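-- pv_equiv track=rewrite | github.com/trevorbaca/akasha | akasha/library.py | moment_markup
-- ===== SOURCE A (Python) =====
-- def moment_markup(moment_tokens):
--     moment_markup = []
--     start_measure = 1
--     for moment_number, measure_count, string in moment_tokens:
--         moment_markup_ = (f"{moment_number}-{string}", start_measure, "#magenta")
--         moment_markup.append(moment_markup_)
--         start_measure += measure_count
--     return moment_markup
-- ===== SOURCE B (Python) =====
-- def moment_markup(moment_tokens):
--     tokens = list(moment_tokens)
--     # Traverse right-to-left: start from the total measure count and subtract,
--     # building the output back-to-front, then reverse once at the end.
--     out = []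
--     end = 1 + sum(mc for _, mc, _ in tokens)
--     for moment_number, measure_count, string in reversed(tokens):
--         end -= measure_count
--         out.append((f"{moment_number}-{string}", end, "#magenta"))
--     out.reverse()
--     return out
-- ===== Notes on version B (the rewrite author's own statement) =====
-- stated objective: alternative
-- what changed: B traverses the tokens right-to-left, starting from the total measure count and subtracting each count to recover the start offsets, building the output back-to-front and reversing once at the end, instead of A's left-to-right loop with a running additive accumulator.
import Mathlib
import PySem

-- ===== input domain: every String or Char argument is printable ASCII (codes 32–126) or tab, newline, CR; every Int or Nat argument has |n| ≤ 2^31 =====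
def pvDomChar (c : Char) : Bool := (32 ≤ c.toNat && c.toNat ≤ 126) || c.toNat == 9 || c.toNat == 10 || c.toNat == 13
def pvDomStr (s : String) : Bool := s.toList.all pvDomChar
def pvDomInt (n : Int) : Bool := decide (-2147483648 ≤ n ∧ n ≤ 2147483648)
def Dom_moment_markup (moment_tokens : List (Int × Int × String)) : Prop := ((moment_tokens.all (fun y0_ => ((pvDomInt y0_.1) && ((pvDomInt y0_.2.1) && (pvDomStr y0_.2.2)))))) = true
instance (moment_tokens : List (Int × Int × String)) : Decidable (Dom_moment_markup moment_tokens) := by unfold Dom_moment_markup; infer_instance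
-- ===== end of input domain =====

-- B: alternative decomposition — right-to-left traversal subtracting from the total measure count, output built back-to-front and reversed once.


-- ===== PORT A =====
-- A: left-to-right loop with running start_measure accumulator, appending one tuple per token
def pvGoA (toks : List (Int × Int × String)) (start_measure : Int) : List (String × Int × String) :=
  match toks with
  | [] => []
  | (n, mc, s) :: rest =>
      (PySem.Int.toStr n ++ "-" ++ s, start_measure, "#magenta") :: pvGoA rest (start_measure + mc)

def moment_markup (moment_tokens : List (Int × Int × String)) : List (String × Int × String) :=
  pvGoA moment_tokens 1

-- ===== PORT B =====
-- B: end = 1 + sum of measure counts; fold over reversed(tokens) subtracting each count,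
-- appending entries back-to-front, then reverse once (transcribes Source B's loop + out.reverse()).
def moment_markup_alt (moment_tokens : List (Int × Int × String)) : List (String × Int × String) :=
  let total : Int := 1 + (moment_tokens.map (fun t => t.2.1)).sum
  let st := moment_tokens.reverse.foldl
    (fun (st : Int × List (String × Int × String)) t =>
      let e := st.1 - t.2.1
      (e, st.2 ++ [(PySem.Int.toStr t.1 ++ "-" ++ t.2.2, e, "#magenta")]))
    (total, [])
  st.2.reverse

-- ===== PRECONDITION & SPEC =====
def Spec_moment_markup (moment_tokens : List (Int × Int × String)) (out : List (String × Int × String)) : Prop := out = moment_markup_alt moment_tokens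
instance (moment_tokens : List (Int × Int × String)) (out : List (String × Int × String)) : Decidable (Spec_moment_markup moment_tokens out) := by unfold Spec_moment_markup; infer_instance

-- ===== CLAIM (what is proved, stated in full; the proofs are below) =====
def Claim_equal_moment_markup : Prop := ∀ (moment_tokens : List (Int × Int × String)), Dom_moment_markup moment_tokens → Spec_moment_markup moment_tokens (moment_markup moment_tokens)

-- ===== LEMMAS AND PROOFS =====
lemma pvFoldB_eq (toks : List (Int × Int × String)) (start : Int)
    (out0 : List (String × Int × String)) :
    toks.reverse.foldl
      (fun (st : Int × List (String × Int × String)) t =>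
        let e := st.1 - t.2.1
        (e, st.2 ++ [(PySem.Int.toStr t.1 ++ "-" ++ t.2.2, e, "#magenta")]))
      (start + (toks.map (fun t => t.2.1)).sum, out0)
    = (start, out0 ++ (pvGoA toks start).reverse) := by
  induction toks generalizing start out0 with
  | nil => simp [pvGoA]
  | cons t rest ih =>
      obtain ⟨n, mc, s⟩ := t
      have h : start + ((((n, mc, s) :: rest).map (fun t => t.2.1)).sum) =
          (start + mc) + ((rest.map (fun t => t.2.1)).sum) := by
        simp; ring
      rw [h]
      simp only [List.reverse_cons, List.foldl_append, ih (start + mc) out0]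
      simp [pvGoA]

-- ===== VERDICT (by name: the statement is the Claim_ definition above) =====
theorem moment_markup_spec : Claim_equal_moment_markup := by
  intro toks _
  unfold Spec_moment_markup moment_markup moment_markup_alt
  have h := pvFoldB_eq toks 1 []
  simp only [List.nil_append] at h
  simp [h]
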